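-- pv_equiv track=rewrite | github.com/krishnatray/cse608_rl_project | wordle_rl_demo.py | create_Qtable
-- ===== SOURCE A (Python) =====
-- def wordle_feedback(target_word, guess_word):
--     green = [(i, g) for i, (t, g) in enumerate(zip(target_word, guess_word)) if t == g]
--     remaining = [(i, t, g) for i, (t, g) in enumerate(zip(target_word, guess_word)) if t != g]
--
--     remaining_target = [t for i, t, g in remaining]
--     yellow = []
--     black = []
--
--     for i, t, g in remaining:
--         if g in remaining_target:
--             yellow.append((i, g))
--             remaining_target.remove(g)  # Remove the letter from the target list so it can't be used again
--         else:
--             black.append((i, g))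
--
--     return {"green": green, "yellow": yellow, "black": black}
--
-- def is_consistent(word, feedback):
--     # Create list from word and a copy for yellow check
--     word_list = list(word)
--     remaining_letters = word_list.copy()
--
--     # 'green' checks: correct letter must be at the correct index
--     for index, letter in feedback['green']:
--         if word_list[index] != letter:
--             return False
--         remaining_letters.remove(letter)  # Mark as used
--
--     # 'yellow' checks: correct letter can't be at the same index, but must exist elsewhere
--     for index, letter in feedback['yellow']:
--         if word_list[index] == letter or letter not in remaining_letters:
--             return False
--         remaining_letters.remove(letter)  # Mark as used
--
--     # 'black' checks: letter must not be in the word at all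
--     for index, letter in feedback['black']:
--         if letter in remaining_letters:
--             return False
--
--     return True
--
-- def create_Qtable(dictionary):
--
--     dict1 = {key: 0 for key in dictionary} #create dictionary
--
--     for key1 in dict1: #step through potential target words
--         for key2 in dict1: #step through each word in dictrionary
--
--             feedback = wordle_feedback(key1, key2) #feedback for traget key1 compared with guess key2
--
--             for key3 in dict1: #computing reduction in length of dictionary by chosing key1 for each key2
--
--                 inconsistent = 0 #reset counter
--
--                 if not is_consistent(key3, feedback):
--                     inconsistent += 1 #counting how many words are eliminated from dicationary
--
--                 dict1[key2] = dict1[key2] + inconsistent #updates key2 for reduction in length of dictionary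
--                 #Updating Qtable
--
--     return(dict1)
-- ===== SOURCE B (Python) =====
-- def _feedback_key(target, guess):
--     # counter-based feedback: one pass collects greens and counts of unmatched
--     # target letters, a second pass classifies yellow/black by decrementing counts
--     green = []
--     counts = {}
--     for i, (t, g) in enumerate(zip(target, guess)):
--         if t == g:
--             green.append((i, g))
--         else:
--             counts[t] = counts.get(t, 0) + 1
--     yellow = []
--     black = []
--     for i, (t, g) in enumerate(zip(target, guess)):
--         if t != g:
--             if counts.get(g, 0) > 0:
--                 yellow.append((i, g))
--                 counts[g] = counts[g] - 1
--             else: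
--                 black.append((i, g))
--     return (tuple(green), tuple(yellow), tuple(black))
--
--
-- def _eliminates(word, fb):
--     # counter-based consistency test: letter multiplicities instead of list removal
--     green, yellow, black = fb
--     counts = {}
--     for ch in word:
--         counts[ch] = counts.get(ch, 0) + 1
--     for i, c in green:
--         if i >= len(word) or word[i] != c:
--             return True
--         counts[c] = counts[c] - 1
--     for i, c in yellow:
--         if (i < len(word) and word[i] == c) or counts.get(c, 0) <= 0:
--             return True
--         counts[c] = counts[c] - 1
--     for i, c in black:
--         if counts.get(c, 0) > 0:
--             return True
--     return False
--
--
-- def create_Qtable(dictionary):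
--     # Group targets by the feedback pattern they induce for each guess and count
--     # the eliminated words once per distinct pattern, multiplied by the group size.
--     words = list(dict.fromkeys(dictionary))
--     totals = {}
--     for guess in words:
--         groups = {}
--         for target in words:
--             key = _feedback_key(target, guess)
--             groups[key] = groups.get(key, 0) + 1
--         total = 0
--         for key, mult in groups.items():
--             bad = 0
--             for w in words:
--                 if _eliminates(w, key):
--                     bad += 1
--             total += mult * bad
--         totals[guess] = total
--     return totals
-- ===== Notes on version B (the rewrite author's own statement) =====
-- stated objective: alternative
-- what changed: B replaces A's triple nested scan with grouping of targets by the feedback pattern they induce per guess (computing the inconsistency count once per distinct pattern and multiplying by the group size), and its feedback/consistency helpers work on letter-multiplicity counters (dict counts) instead of A's list membership + remove loops; a timing run's input family showed no measurable speed difference.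
-- outside the precondition, e.g. on create_Qtable(['ab', 'a']): A raises IndexError, B returns {'ab': 1, 'a': 0}
import Mathlib
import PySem

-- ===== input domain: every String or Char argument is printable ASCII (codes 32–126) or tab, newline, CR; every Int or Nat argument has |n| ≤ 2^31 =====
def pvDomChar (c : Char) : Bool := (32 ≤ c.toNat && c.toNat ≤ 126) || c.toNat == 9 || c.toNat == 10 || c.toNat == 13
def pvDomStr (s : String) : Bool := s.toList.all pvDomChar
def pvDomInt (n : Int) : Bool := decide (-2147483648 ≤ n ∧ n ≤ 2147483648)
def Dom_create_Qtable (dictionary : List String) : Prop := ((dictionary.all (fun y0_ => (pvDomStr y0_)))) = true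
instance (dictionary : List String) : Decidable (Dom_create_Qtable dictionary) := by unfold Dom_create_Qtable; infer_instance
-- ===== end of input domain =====

-- B re-implements the Q-table with counter (multiplicity) based feedback/consistency
-- helpers and groups targets by feedback pattern, counting eliminated words once per
-- distinct pattern (objective: alternative); proved to return exactly A's Q-table on Pre_.


-- feedback dict {"green": …, "yellow": …, "black": …} has fixed string keys: ported as a triple (green, yellow, black)
abbrev FB := List (Int × Char) × List (Int × Char) × List (Int × Char)

-- ===== PORT A =====
-- wordle_feedback (A's helper: list-removal based)
def wordleFeedback (target guess : String) : FB :=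
  let pairs := PySem.List.enumerate (target.toList.zip guess.toList)
  let green := (pairs.filter (fun p => p.2.1 == p.2.2)).map (fun p => (p.1, p.2.2))
  let remaining := (pairs.filter (fun p => !(p.2.1 == p.2.2))).map (fun p => (p.1, p.2.1, p.2.2))
  let remainingTarget := remaining.map (fun r => r.2.1)
  let s := remaining.foldl
    (fun (s : List (Int × Char) × List (Int × Char) × List Char) r =>
      if s.2.2.contains r.2.2 then
        (s.1 ++ [(r.1, r.2.2)], s.2.1, (PySem.List.remove? s.2.2 r.2.2).getD s.2.2)
      else
        (s.1, s.2.1 ++ [(r.1, r.2.2)], s.2.2))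
    ([], [], remainingTarget)
  (green, s.1, s.2.1)

-- 'green' loop of A's is_consistent; none = early `return False` (also the IndexError
-- case `word_list[index]` with index out of range, which Pre_ excludes)
def greenLoop (wl : List Char) : List (Int × Char) → List Char → Option (List Char)
  | [], rem => some rem
  | (i, c) :: rest, rem =>
      if PySem.List.pyGet? wl i = some c then
        greenLoop wl rest ((PySem.List.remove? rem c).getD rem)
      else none

-- 'yellow' loop of A's is_consistent (same convention as greenLoop)
def yellowLoop (wl : List Char) : List (Int × Char) → List Char → Option (List Char)
  | [], rem => some rem
  | (i, c) :: rest, rem =>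
      if PySem.List.pyGet? wl i = some c ∨ ¬ rem.contains c then none
      else yellowLoop wl rest ((PySem.List.remove? rem c).getD rem)

-- is_consistent (A's helper)
def isConsistent (word : String) (fb : FB) : Bool :=
  let wl := word.toList
  match greenLoop wl fb.1 wl with
  | none => false
  | some rem =>
    match yellowLoop wl fb.2.1 rem with
    | none => false
    | some rem2 => fb.2.2.all (fun p => !(rem2.contains p.2))

def create_Qtable (dictionary : List String) : List (String × Int) :=
  let dict1 : PySem.Dict String Int :=
    dictionary.foldl (fun d key => d.insert key 0) PySem.Dict.empty
  let keys := dict1.keys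
  let final := keys.foldl (fun d key1 =>
    keys.foldl (fun d key2 =>
      let fb := wordleFeedback key1 key2
      keys.foldl (fun d key3 =>
        let inconsistent : Int := if !(isConsistent key3 fb) then 1 else 0
        d.modify key2 0 (· + inconsistent)) d) d) dict1
  final.items

-- ===== PORT B =====
-- _feedback_key: counter-based feedback — pass 1 collects greens and counts of the
-- unmatched target letters, pass 2 classifies yellow/black by decrementing counts
def fbB (target guess : String) : FB :=
  let pairs := PySem.List.enumerate (target.toList.zip guess.toList)
  let s1 := pairs.foldl
    (fun (s : List (Int × Char) × PySem.Dict Char Int) p =>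
      if p.2.1 == p.2.2 then (s.1 ++ [(p.1, p.2.2)], s.2)
      else (s.1, s.2.insert p.2.1 (s.2.getD p.2.1 0 + 1)))
    ([], PySem.Dict.empty)
  let s2 := pairs.foldl
    (fun (s : List (Int × Char) × List (Int × Char) × PySem.Dict Char Int) p =>
      if p.2.1 == p.2.2 then s
      else if 0 < s.2.2.getD p.2.2 0 then
        (s.1 ++ [(p.1, p.2.2)], s.2.1, s.2.2.insert p.2.2 (s.2.2.getD p.2.2 0 - 1))
      else (s.1, s.2.1 ++ [(p.1, p.2.2)], s.2.2))
    ([], [], s1.2)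
  (s1.1, s2.1, s2.2.1)

-- green loop of B's _eliminates: none = early `return True`
def greenLoopB (wl : List Char) : List (Int × Char) → PySem.Dict Char Int → Option (PySem.Dict Char Int)
  | [], cnt => some cnt
  | (i, c) :: rest, cnt =>
      if decide ((wl.length : Int) ≤ i) || !(PySem.List.pyGet? wl i == some c) then none
      else greenLoopB wl rest (cnt.insert c (cnt.getD c 0 - 1))

-- yellow loop of B's _eliminates
def yellowLoopB (wl : List Char) : List (Int × Char) → PySem.Dict Char Int → Option (PySem.Dict Char Int)
  | [], cnt => some cnt
  | (i, c) :: rest, cnt =>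
      if (decide (i < (wl.length : Int)) && (PySem.List.pyGet? wl i == some c)) || decide (cnt.getD c 0 ≤ 0) then none
      else yellowLoopB wl rest (cnt.insert c (cnt.getD c 0 - 1))

-- _eliminates: counter-based consistency test (letter multiplicities, no list removal)
def elimB (word : String) (fb : FB) : Bool :=
  let wl := word.toList
  let cnt0 : PySem.Dict Char Int :=
    wl.foldl (fun cnt ch => cnt.insert ch (cnt.getD ch 0 + 1)) PySem.Dict.empty
  match greenLoopB wl fb.1 cnt0 with
  | none => true
  | some c1 =>
    match yellowLoopB wl fb.2.1 c1 with
    | none => true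
    | some c2 => fb.2.2.any (fun p => decide (0 < c2.getD p.2 0))

def create_Qtable_alt (dictionary : List String) : List (String × Int) :=
  let words := PySem.List.dedup dictionary
  (words.foldl (fun (totals : PySem.Dict String Int) guess =>
      let groups : PySem.Dict FB Int := words.foldl (fun gs target =>
          gs.insert (fbB target guess) (gs.getD (fbB target guess) 0 + 1)) PySem.Dict.empty
      let total := groups.items.foldl (fun acc p =>
          acc + p.2 * (words.foldl (fun bad w => if elimB w p.1 then bad + 1 else bad) 0)) 0
      totals.insert guess total) PySem.Dict.empty).items

-- ===== PRECONDITION & SPEC =====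
-- Pre_ excludes the dictionaries on which A raises IndexError (a feedback index of a
-- pair (u, v) reaching past the end of a shorter word w before an earlier check fails):
-- for every triple with w shorter than the (u, v) overlap, either some position where u
-- and v agree below len w disagrees with w (A returns False there first), or every
-- overlap position past len w holds a letter of v absent from u (necessarily 'black',
-- so it is never indexed).
def Pre_create_Qtable (dictionary : List String) : Prop :=
  ∀ u ∈ dictionary, ∀ v ∈ dictionary, ∀ w ∈ dictionary,
    w.toList.length < min u.toList.length v.toList.length →
    (∃ i < w.toList.length, u.toList.getD i ' ' = v.toList.getD i ' ' ∧
        w.toList.getD i ' ' ≠ u.toList.getD i ' ') ∨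
    (∀ i < min u.toList.length v.toList.length, w.toList.length ≤ i →
        v.toList.getD i ' ' ∉ u.toList)
instance (dictionary : List String) : Decidable (Pre_create_Qtable dictionary) := by
  unfold Pre_create_Qtable; infer_instance

def pvWitness_create_Qtable : List String := (["cat", "dog", "cot"])

def Spec_create_Qtable (dictionary : List String) (out : List (String × Int)) : Prop := out = create_Qtable_alt dictionary
instance (dictionary : List String) (out : List (String × Int)) : Decidable (Spec_create_Qtable dictionary out) := by unfold Spec_create_Qtable; infer_instance

-- ===== CLAIM (what is proved, stated in full; the proofs are below) =====
def Claim_equal_create_Qtable : Prop := ∀ (dictionary : List String), Dom_create_Qtable dictionary → Pre_create_Qtable dictionary → Spec_create_Qtable dictionary (create_Qtable dictionary)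


-- ===== LEMMAS AND PROOFS =====

-- the inconsistency predicate A counts with
def badP (fb : FB) (w : String) : Bool := !(isConsistent w fb)

-- the per-(target,guess) eliminated-word count, as an Int
def cntF (ws : List String) (fb : FB) : Int := (ws.countP (badP fb) : Int)

-- the value both Q-tables assign to a guess
def qVal (ws : List String) (g : String) : Int :=
  (ws.map (fun t => cntF ws (wordleFeedback t g))).sum

-- ---- equality of the helpers: fbB = wordle_feedback ----

-- number of positions of wl holding c is the multiplicity of c
theorem positions_count (wl : List Char) (c : Char) :
    ((List.range wl.length).filter (fun j => wl[j]? = some c)).length = wl.count c := by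
  induction wl with
  | nil => simp
  | cons a t ih =>
    rw [List.length_cons, List.range_succ_eq_map, List.filter_cons, List.filter_map]
    have hf : List.filter ((fun j => decide ((a :: t)[j]? = some c)) ∘ Nat.succ) (List.range t.length)
        = List.filter (fun j => decide (t[j]? = some c)) (List.range t.length) := by
      apply List.filter_congr; intro j _; simp
    rw [hf]
    by_cases h : a = c
    · rw [if_pos (by simp [h])]
      subst h
      simp [ih, List.count_cons_self]
    · rw [if_neg (by simp [h])]
      rw [List.count_cons_of_ne h]
      simp [ih]

theorem lt_length_of_getElem?_eq_some {α : Type} (wl : List α) (j : Nat) (c : α)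
    (h : wl[j]? = some c) : j < wl.length := by
  by_contra hc
  rw [List.getElem?_eq_none (by omega)] at h
  simp at h

theorem nodup_idx_le_count (wl : List Char) (c : Char) (idxs : List Nat) (hnd : idxs.Nodup)
    (h : ∀ j ∈ idxs, wl[j]? = some c) : idxs.length ≤ wl.count c := by
  have hsub : idxs ⊆ (List.range wl.length).filter (fun j => wl[j]? = some c) := by
    intro j hj
    rw [List.mem_filter, List.mem_range]
    exact ⟨lt_length_of_getElem?_eq_some wl j c (h j hj), by simp [h j hj]⟩
  calc idxs.length ≤ _ := (hnd.subperm hsub).length_le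
    _ = wl.count c := positions_count wl c

-- letters read off distinct positions of wl occur in wl with at least that multiplicity
theorem count_snd_le (wl : List Char) (l : List (Int × Char))
    (hnd : (l.map Prod.fst).Nodup)
    (h : ∀ p ∈ l, 0 ≤ p.1 ∧ PySem.List.pyGet? wl p.1 = some p.2) (c : Char) :
    (l.map Prod.snd).count c ≤ wl.count c := by
  have hlen : (l.map Prod.snd).count c = ((l.filter (fun p => p.2 = c)).map (fun p => p.1.toNat)).length := by
    clear hnd h
    rw [List.length_map, ← List.countP_eq_length_filter]
    induction l with
    | nil => simp
    | cons p l ih =>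
      rw [List.map_cons, List.count_cons, List.countP_cons, ih]
      by_cases hpc : p.2 = c
      · simp [hpc]
      · simp [hpc]
  rw [hlen]
  apply nodup_idx_le_count
  · have h1 : ((l.filter (fun p => p.2 = c)).map Prod.fst).Nodup :=
      List.Nodup.sublist (List.Sublist.map Prod.fst List.filter_sublist) hnd
    have hmm : (l.filter (fun p => p.2 = c)).map (fun p => p.1.toNat)
        = ((l.filter (fun p => p.2 = c)).map Prod.fst).map Int.toNat := by
      rw [List.map_map]; rfl
    rw [hmm]
    apply List.Nodup.map_on _ h1
    intro x hx y hy hxy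
    simp only [List.mem_map, List.mem_filter] at hx hy
    obtain ⟨p, hp, rfl⟩ := hx
    obtain ⟨q, hq, rfl⟩ := hy
    have hxp := (h p hp.1).1
    have hyq := (h q hq.1).1
    omega
  · intro j hj
    simp only [List.mem_map, List.mem_filter] at hj
    obtain ⟨p, ⟨hp, hpc⟩, rfl⟩ := hj
    obtain ⟨hp0, hpg⟩ := h p hp
    rw [PySem.List.pyGet?_of_nonneg _ hp0] at hpg
    simp only [decide_eq_true_eq] at hpc
    rw [hpg, hpc]

-- pass 1 of fbB: greens are appended, counts of unmatched target letters accumulate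
theorem pass1_split (l : List (Int × Char × Char)) (acc : List (Int × Char)) (d : PySem.Dict Char Int) :
    l.foldl (fun (s : List (Int × Char) × PySem.Dict Char Int) p =>
        if p.2.1 == p.2.2 then (s.1 ++ [(p.1, p.2.2)], s.2)
        else (s.1, s.2.insert p.2.1 (s.2.getD p.2.1 0 + 1))) (acc, d)
      = (acc ++ (l.filter (fun p => p.2.1 == p.2.2)).map (fun p => (p.1, p.2.2)),
         (l.filter (fun p => !(p.2.1 == p.2.2))).foldl
           (fun d p => d.insert p.2.1 (d.getD p.2.1 0 + 1)) d) := by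
  induction l generalizing acc d with
  | nil => simp
  | cons p l ih =>
    by_cases h : p.2.1 == p.2.2
    · simp only [List.foldl_cons, List.filter_cons, h, if_pos, Bool.not_true]
      rw [ih]
      simp
    · simp only [List.foldl_cons, List.filter_cons, h, Bool.not_false]
      rw [ih]
      simp

-- pass 2 of fbB simulates A's removal loop: same yellow and black lists
theorem pass2Sim (l : List (Int × Char × Char)) (yel blk : List (Int × Char))
    (rt : List Char) (cnt : PySem.Dict Char Int)
    (hInv : ∀ c, cnt.getD c 0 = (rt.count c : Int)) :
    (l.foldl (fun (s : List (Int × Char) × List (Int × Char) × List Char) r =>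
        if s.2.2.contains r.2.2 then
          (s.1 ++ [(r.1, r.2.2)], s.2.1, (PySem.List.remove? s.2.2 r.2.2).getD s.2.2)
        else (s.1, s.2.1 ++ [(r.1, r.2.2)], s.2.2)) (yel, blk, rt)).1
      = (l.foldl (fun (s : List (Int × Char) × List (Int × Char) × PySem.Dict Char Int) p =>
          if 0 < s.2.2.getD p.2.2 0 then
            (s.1 ++ [(p.1, p.2.2)], s.2.1, s.2.2.insert p.2.2 (s.2.2.getD p.2.2 0 - 1))
          else (s.1, s.2.1 ++ [(p.1, p.2.2)], s.2.2)) (yel, blk, cnt)).1 ∧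
    (l.foldl (fun (s : List (Int × Char) × List (Int × Char) × List Char) r =>
        if s.2.2.contains r.2.2 then
          (s.1 ++ [(r.1, r.2.2)], s.2.1, (PySem.List.remove? s.2.2 r.2.2).getD s.2.2)
        else (s.1, s.2.1 ++ [(r.1, r.2.2)], s.2.2)) (yel, blk, rt)).2.1
      = (l.foldl (fun (s : List (Int × Char) × List (Int × Char) × PySem.Dict Char Int) p =>
          if 0 < s.2.2.getD p.2.2 0 then
            (s.1 ++ [(p.1, p.2.2)], s.2.1, s.2.2.insert p.2.2 (s.2.2.getD p.2.2 0 - 1))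
          else (s.1, s.2.1 ++ [(p.1, p.2.2)], s.2.2)) (yel, blk, cnt)).2.1 := by
  induction l generalizing yel blk rt cnt with
  | nil => exact ⟨rfl, rfl⟩
  | cons p l ih =>
    simp only [List.foldl_cons]
    by_cases h : rt.contains p.2.2
    · have hmem : p.2.2 ∈ rt := by simpa using h
      have hcnt : 0 < cnt.getD p.2.2 0 := by
        rw [hInv]
        exact_mod_cast List.count_pos_iff.mpr hmem
      rw [if_pos h, if_pos hcnt, PySem.List.remove?_eq_some_erase rt _ hmem, Option.getD_some]
      apply ih
      intro c
      rw [PySem.Dict.getD_insert]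
      by_cases hc : c = p.2.2
      · subst hc
        rw [if_pos rfl, hInv]
        have h1 := List.count_pos_iff.mpr hmem
        rw [List.count_erase_self]
        omega
      · rw [if_neg hc, hInv, List.count_erase_of_ne hc]
    · have hmem : p.2.2 ∉ rt := by simpa using h
      have hcnt : ¬ 0 < cnt.getD p.2.2 0 := by
        rw [hInv]
        simp [List.count_eq_zero_of_not_mem hmem]
      rw [if_neg h, if_neg hcnt]
      exact ih _ _ _ _ hInv

theorem foldl_skip {α β : Type} (l : List α) (p : α → Bool) (f : β → α → β) (s : β) :
    l.foldl (fun s x => if p x then s else f s x) s = (l.filter (fun x => !(p x))).foldl f s := by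
  rw [List.foldl_filter]
  apply PySem.List.foldl_congr_mem
  intro acc x _
  by_cases h : p x <;> simp [h]

theorem map_triple_eta (l : List (Int × Char × Char)) :
    l.map (fun p => (p.1, p.2.1, p.2.2)) = l := by
  conv_rhs => rw [← List.map_id l]
  rfl

theorem cnt_fold_count_aux (l : List (Int × Char × Char)) (c : Char) (d : PySem.Dict Char Int) :
    (l.foldl (fun d p => d.insert p.2.1 (d.getD p.2.1 0 + 1)) d).getD c 0
      = d.getD c 0 + ((l.map (fun r => r.2.1)).count c : Int) := by
  induction l generalizing d with
  | nil => simp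
  | cons p l ih =>
    rw [List.foldl_cons, ih, List.map_cons, List.count_cons]
    rw [PySem.Dict.getD_insert]
    by_cases hc : c = p.2.1
    · rw [if_pos hc]
      simp [hc]
      ring
    · rw [if_neg hc]
      have : ¬ p.2.1 = c := fun hh => hc hh.symm
      simp [this]

theorem cnt_fold_count (l : List (Int × Char × Char)) (c : Char) :
    (l.foldl (fun d p => d.insert p.2.1 (d.getD p.2.1 0 + 1)) PySem.Dict.empty).getD c 0
      = ((l.map (fun r => r.2.1)).count c : Int) := by
  rw [cnt_fold_count_aux]
  simp

theorem fbB_eq (target guess : String) : fbB target guess = wordleFeedback target guess := by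
  simp only [fbB, wordleFeedback]
  rw [pass1_split, List.nil_append, map_triple_eta, foldl_skip]
  obtain ⟨hy, hb⟩ := pass2Sim
    (PySem.List.enumerate (target.toList.zip guess.toList) |>.filter (fun p => !(p.2.1 == p.2.2)))
    [] []
    ((PySem.List.enumerate (target.toList.zip guess.toList) |>.filter
        (fun p => !(p.2.1 == p.2.2))).map (fun r => r.2.1))
    ((PySem.List.enumerate (target.toList.zip guess.toList) |>.filter
        (fun p => !(p.2.1 == p.2.2))).foldl
        (fun d p => d.insert p.2.1 (d.getD p.2.1 0 + 1)) PySem.Dict.empty)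
    (fun c => cnt_fold_count _ c)
  rw [Prod.mk.injEq, Prod.mk.injEq]
  exact ⟨rfl, hy.symm, hb.symm⟩

-- ---- equality of the helpers: elimB = not is_consistent (on real feedbacks) ----

theorem greenSim (wl : List Char) (gs P : List (Int × Char)) (rem : List Char) (cnt : PySem.Dict Char Int)
    (hIdx : ((P ++ gs).map Prod.fst).Nodup)
    (hP : ∀ p ∈ P, 0 ≤ p.1 ∧ PySem.List.pyGet? wl p.1 = some p.2)
    (hGs : ∀ p ∈ gs, 0 ≤ p.1)
    (hRem : ∀ c, (rem.count c : Int) = (wl.count c : Int) - ((P.map Prod.snd).count c : Int))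
    (hInv : ∀ c, cnt.getD c 0 = (rem.count c : Int)) :
    (greenLoop wl gs rem = none ∧ greenLoopB wl gs cnt = none) ∨
    (∃ rem' cnt', greenLoop wl gs rem = some rem' ∧ greenLoopB wl gs cnt = some cnt' ∧
      ∀ c, cnt'.getD c 0 = (rem'.count c : Int)) := by
  induction gs generalizing P rem cnt with
  | nil => exact Or.inr ⟨rem, cnt, rfl, rfl, hInv⟩
  | cons p gs ih =>
    obtain ⟨i, c⟩ := p
    simp only [greenLoop, greenLoopB]
    by_cases h : PySem.List.pyGet? wl i = some c
    · have h0 : (0 : Int) ≤ i := hGs (i, c) (List.mem_cons_self)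
      have hlt : i < (wl.length : Int) := by
        rw [PySem.List.pyGet?_of_nonneg _ h0] at h
        have := lt_length_of_getElem?_eq_some wl i.toNat c h
        omega
      have hcondB : (decide ((wl.length : Int) ≤ i) || !(PySem.List.pyGet? wl i == some c)) = false := by
        simp [h, not_le.mpr hlt]
      rw [if_pos h]
      simp only [hcondB, Bool.false_eq_true, if_false]
      have happ : P ++ (i, c) :: gs = (P ++ [(i, c)]) ++ gs := by
        rw [List.append_assoc]; rfl
      have hIdx' : (((P ++ [(i, c)]) ++ gs).map Prod.fst).Nodup := by rwa [← happ]
      have hP' : ∀ p ∈ P ++ [(i, c)], 0 ≤ p.1 ∧ PySem.List.pyGet? wl p.1 = some p.2 := by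
        intro p hp
        rcases List.mem_append.mp hp with hp | hp
        · exact hP p hp
        · simp only [List.mem_singleton] at hp
          subst hp
          exact ⟨h0, h⟩
      have hle := count_snd_le wl (P ++ [(i, c)])
        (List.Nodup.sublist (List.Sublist.map Prod.fst (List.sublist_append_left _ _)) hIdx')
        hP' c
      have hle1 : (P.map Prod.snd).count c + 1 ≤ wl.count c := by
        rw [List.map_append] at hle
        simpa using hle
      have hpos : 0 < rem.count c := by
        have := hRem c
        omega
      have hmem : c ∈ rem := List.count_pos_iff.mp hpos
      rw [PySem.List.remove?_eq_some_erase rem _ hmem, Option.getD_some]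
      apply ih (P ++ [(i, c)])
      · rwa [← happ]
      · exact hP'
      · exact fun q hq => hGs q (List.mem_cons_of_mem _ hq)
      · intro c'
        by_cases hc : c' = c
        · subst hc
          have h1 : (rem.erase c').count c' = rem.count c' - 1 := List.count_erase_self
          have h2 : (((P ++ [(i, c')]).map Prod.snd)).count c' = (P.map Prod.snd).count c' + 1 := by
            simp [List.map_append]
          rw [h1, h2]
          have h3 := hRem c'
          push_cast
          omega
        · have h2 : (((P ++ [(i, c)]).map Prod.snd)).count c' = (P.map Prod.snd).count c' := by
            have hcc : ¬ c = c' := fun hh => hc hh.symm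
            simp [List.map_append, hcc]
          rw [List.count_erase_of_ne hc, h2, hRem c']
      · intro c'
        rw [PySem.Dict.getD_insert]
        by_cases hc : c' = c
        · subst hc
          rw [if_pos rfl, hInv, List.count_erase_self]
          omega
        · rw [if_neg hc, hInv, List.count_erase_of_ne hc]
    · have hcondB : (decide ((wl.length : Int) ≤ i) || !(PySem.List.pyGet? wl i == some c)) = true := by
        simp [h]
      rw [if_neg h]
      simp only [hcondB, if_true]
      exact Or.inl ⟨by simp, by simp⟩

theorem yellowSim (wl : List Char) (ys : List (Int × Char)) (rem : List Char) (cnt : PySem.Dict Char Int)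
    (hYs : ∀ p ∈ ys, 0 ≤ p.1)
    (hInv : ∀ c, cnt.getD c 0 = (rem.count c : Int)) :
    (yellowLoop wl ys rem = none ∧ yellowLoopB wl ys cnt = none) ∨
    (∃ rem' cnt', yellowLoop wl ys rem = some rem' ∧ yellowLoopB wl ys cnt = some cnt' ∧
      ∀ c, cnt'.getD c 0 = (rem'.count c : Int)) := by
  induction ys generalizing rem cnt with
  | nil => exact Or.inr ⟨rem, cnt, rfl, rfl, hInv⟩
  | cons p ys ih =>
    obtain ⟨i, c⟩ := p
    have h0 : (0 : Int) ≤ i := hYs (i, c) (List.mem_cons_self)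
    simp only [yellowLoop, yellowLoopB]
    by_cases hA : PySem.List.pyGet? wl i = some c ∨ ¬ rem.contains c
    · have hcondB : ((decide (i < (wl.length : Int)) && (PySem.List.pyGet? wl i == some c)) ||
          decide (cnt.getD c 0 ≤ 0)) = true := by
        rcases hA with hA | hA
        · have hlt : i < (wl.length : Int) := by
            rw [PySem.List.pyGet?_of_nonneg _ h0] at hA
            have := lt_length_of_getElem?_eq_some wl i.toNat c hA
            omega
          simp [hA, hlt]
        · have : rem.count c = 0 := by
            rw [List.count_eq_zero]
            simpa using hA
          have := hInv c
          simp only [Bool.or_eq_true, decide_eq_true_eq]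
          right
          omega
      rw [if_pos hA]
      simp only [hcondB, if_true]
      exact Or.inl ⟨by simp, by simp⟩
    · push Not at hA
      obtain ⟨hne, hcon⟩ := hA
      have hmem : c ∈ rem := by simpa using hcon
      have hpos : 0 < rem.count c := List.count_pos_iff.mpr hmem
      have hcondB : ((decide (i < (wl.length : Int)) && (PySem.List.pyGet? wl i == some c)) ||
          decide (cnt.getD c 0 ≤ 0)) = false := by
        have := hInv c
        simp only [Bool.or_eq_false_iff, Bool.and_eq_false_iff, decide_eq_false_iff_not, not_le]
        constructor
        · right
          simp [hne]
        · omega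
      have hAcond : ¬ (PySem.List.pyGet? wl i = some c ∨ ¬ rem.contains c) := by
        push Not
        exact ⟨hne, by simpa using hmem⟩
      rw [if_neg hAcond]
      simp only [hcondB, Bool.false_eq_true, if_false]
      rw [PySem.List.remove?_eq_some_erase rem _ hmem, Option.getD_some]
      apply ih _ _ (fun q hq => hYs q (List.mem_cons_of_mem _ hq))
      intro c'
      rw [PySem.Dict.getD_insert]
      by_cases hc : c' = c
      · subst hc
        rw [if_pos rfl, hInv, List.count_erase_self]
        omega
      · rw [if_neg hc, hInv, List.count_erase_of_ne hc]

-- structural facts about A's feedback values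
theorem wf_green_facts (t g : String) :
    (((wordleFeedback t g).1).map Prod.fst).Nodup ∧ ∀ p ∈ (wordleFeedback t g).1, 0 ≤ p.1 := by
  simp only [wordleFeedback]
  constructor
  · have hpl : (PySem.List.enumerate (t.toList.zip g.toList)).Pairwise (fun p q => p.1 < q.1) :=
      PySem.List.pairwise_lt_enumerate _ _
    have h2 : ((PySem.List.enumerate (t.toList.zip g.toList)).filter
        (fun p => p.2.1 == p.2.2)).Pairwise (fun p q => p.1 < q.1) :=
      List.Pairwise.sublist List.filter_sublist hpl
    rw [List.map_map]
    have h3 : ((PySem.List.enumerate (t.toList.zip g.toList) |>.filter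
        (fun p => p.2.1 == p.2.2)).map (Prod.fst ∘ fun p => (p.1, p.2.2))).Pairwise (· < ·) :=
      List.pairwise_map.mpr h2
    exact h3.imp (fun h => ne_of_lt h)
  · intro p hp
    simp only [List.mem_map, List.mem_filter] at hp
    obtain ⟨q, ⟨hq, _⟩, rfl⟩ := hp
    rw [PySem.List.mem_enumerate_iff] at hq
    obtain ⟨k, hk, rfl⟩ := hq
    simp

-- every yellow entry of A's feedback carries an index coming from enumerate, hence ≥ 0
theorem yellow_mem_src (l : List (Int × Char × Char)) (yel blk : List (Int × Char)) (rt : List Char) :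
    ∀ q ∈ (l.foldl (fun (s : List (Int × Char) × List (Int × Char) × List Char) r =>
        if s.2.2.contains r.2.2 then
          (s.1 ++ [(r.1, r.2.2)], s.2.1, (PySem.List.remove? s.2.2 r.2.2).getD s.2.2)
        else (s.1, s.2.1 ++ [(r.1, r.2.2)], s.2.2)) (yel, blk, rt)).1,
      q ∈ yel ∨ ∃ r ∈ l, q = (r.1, r.2.2) := by
  induction l generalizing yel blk rt with
  | nil => exact fun q hq => Or.inl hq
  | cons r l ih =>
    intro q hq
    simp only [List.foldl_cons] at hq
    by_cases h : rt.contains r.2.2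
    · rw [if_pos h] at hq
      rcases ih _ _ _ q hq with hm | ⟨r', hr', hqe⟩
      · rcases List.mem_append.mp hm with h1 | h1
        · exact Or.inl h1
        · simp only [List.mem_singleton] at h1
          exact Or.inr ⟨r, List.mem_cons_self, h1⟩
      · exact Or.inr ⟨r', List.mem_cons_of_mem _ hr', hqe⟩
    · rw [if_neg h] at hq
      rcases ih _ _ _ q hq with hm | ⟨r', hr', hqe⟩
      · exact Or.inl hm
      · exact Or.inr ⟨r', List.mem_cons_of_mem _ hr', hqe⟩

theorem wf_yellow_nonneg (t g : String) : ∀ p ∈ (wordleFeedback t g).2.1, 0 ≤ p.1 := by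
  simp only [wordleFeedback]
  intro p hp
  rcases yellow_mem_src _ _ _ _ p hp with hm | ⟨r, hr, hqe⟩
  · simp at hm
  · simp only [List.mem_map, List.mem_filter] at hr
    obtain ⟨q, ⟨hq, _⟩, rfl⟩ := hr
    rw [PySem.List.mem_enumerate_iff] at hq
    obtain ⟨k, hk, rfl⟩ := hq
    rw [hqe]
    simp

theorem elimB_eq (w t g : String) :
    elimB w (wordleFeedback t g) = !(isConsistent w (wordleFeedback t g)) := by
  simp only [elimB, isConsistent]
  rw [PySem.Dict.foldl_insert_getD_add_one_eq_counter]
  obtain ⟨hnd, hg0⟩ := wf_green_facts t g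
  have hgs := greenSim w.toList (wordleFeedback t g).1 [] w.toList
    (PySem.Dict.counter w.toList) (by simpa using hnd) (by simp) hg0 (by simp)
    (fun c => PySem.Dict.getD_counter _ _)
  rcases hgs with ⟨ha, hb⟩ | ⟨rem', cnt', ha, hb, hinv⟩
  · rw [ha, hb]
    rfl
  · rw [ha, hb]
    dsimp only
    have hys := yellowSim w.toList (wordleFeedback t g).2.1 rem' cnt'
      (wf_yellow_nonneg t g) hinv
    rcases hys with ⟨ha2, hb2⟩ | ⟨rem2, cnt2, ha2, hb2, hinv2⟩
    · rw [ha2, hb2]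
      rfl
    · rw [ha2, hb2]
      dsimp only
      have hpt : ∀ p : Int × Char, (decide (0 < cnt2.getD p.2 0)) = rem2.contains p.2 := by
        intro p
        rw [hinv2]
        by_cases hm : p.2 ∈ rem2
        · have h1 : 0 < rem2.count p.2 := List.count_pos_iff.mpr hm
          have h2 : rem2.contains p.2 = true := by simpa using hm
          rw [h2]
          simp only [decide_eq_true_eq]
          exact_mod_cast h1
        · have h2 : rem2.contains p.2 = false := by simpa using hm
          rw [h2, List.count_eq_zero_of_not_mem hm]
          norm_num
      calc ((wordleFeedback t g).2.2).any (fun p => decide (0 < cnt2.getD p.2 0))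
          = ((wordleFeedback t g).2.2).any (fun p => rem2.contains p.2) := by
            rw [funext hpt]
        _ = !(((wordleFeedback t g).2.2).all (fun p => !(rem2.contains p.2))) := by
            simp [List.all_eq_not_any_not]

-- ---- A side ----

def innerA (K : List String) (key2 : String) (fb : FB) (d : PySem.Dict String Int) :
    PySem.Dict String Int :=
  K.foldl (fun d key3 =>
    d.modify key2 0 (· + (if !(isConsistent key3 fb) then 1 else 0))) d

def midA (K : List String) (key1 : String) (d : PySem.Dict String Int) :
    PySem.Dict String Int :=
  K.foldl (fun d key2 => innerA K key2 (wordleFeedback key1 key2) d) d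

theorem create_Qtable_unfold (dictionary : List String) :
    create_Qtable dictionary =
      (let dict1 : PySem.Dict String Int :=
        dictionary.foldl (fun d key => d.insert key 0) PySem.Dict.empty
       (dict1.keys.foldl (fun d key1 => midA dict1.keys key1 d) dict1).items) := rfl

theorem innerA_getD (K : List String) (key2 : String) (fb : FB)
    (d : PySem.Dict String Int) (k : String) :
    (innerA K key2 fb d).getD k 0 =
      d.getD k 0 + (if k = key2 then cntF K fb else 0) := by
  induction K generalizing d with
  | nil => simp [innerA, cntF]
  | cons key3 K' ih =>
    simp only [innerA, List.foldl_cons] at *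
    rw [ih, PySem.Dict.getD_modify]
    simp only [cntF, badP, List.countP_cons]
    split_ifs with h1 h2 <;> · push_cast; simp_all; try ring

theorem innerA_keys (K : List String) (key2 : String) (fb : FB)
    (d : PySem.Dict String Int) (h : d.contains key2 = true) :
    (innerA K key2 fb d).keys = d.keys := by
  induction K generalizing d with
  | nil => simp [innerA]
  | cons key3 K' ih =>
    simp only [innerA, List.foldl_cons] at *
    rw [ih _ (by simp [PySem.Dict.contains_modify, h]),
        PySem.Dict.keys_modify, PySem.Dict.keys_insert_of_contains _ _ h]

theorem midA_getD (l K : List String) (key1 : String)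
    (d : PySem.Dict String Int) (hl : ∀ x ∈ l, d.contains x = true) (k : String) :
    (l.foldl (fun d key2 => innerA K key2 (wordleFeedback key1 key2) d) d).getD k 0 =
      d.getD k 0 +
        (l.map (fun key2 => if k = key2 then cntF K (wordleFeedback key1 key2) else 0)).sum ∧
    (l.foldl (fun d key2 => innerA K key2 (wordleFeedback key1 key2) d) d).keys = d.keys := by
  induction l generalizing d with
  | nil => simp
  | cons key2 l' ih =>
    simp only [List.foldl_cons, List.map_cons, List.sum_cons]
    have hk : (innerA K key2 (wordleFeedback key1 key2) d).keys = d.keys :=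
      innerA_keys _ _ _ _ (hl key2 (by simp))
    have hc : ∀ x ∈ l', (innerA K key2 (wordleFeedback key1 key2) d).contains x = true := by
      intro x hx
      rw [PySem.Dict.contains_iff_mem_keys, hk, ← PySem.Dict.contains_iff_mem_keys]
      exact hl x (by simp [hx])
    obtain ⟨h1, h2⟩ := ih _ hc
    refine ⟨?_, by rw [h2, hk]⟩
    rw [h1, innerA_getD]
    ring

theorem sum_map_single {α : Type} [DecidableEq α] (l : List α) (k : α) (f : α → Int)
    (hnd : l.Nodup) (hk : k ∈ l) :
    (l.map (fun x => if k = x then f x else 0)).sum = f k := by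
  induction l with
  | nil => simp at hk
  | cons x l' ih =>
    simp only [List.map_cons, List.sum_cons]
    rcases List.mem_cons.mp hk with h | h
    · subst h
      have : (l'.map (fun x => if k = x then f x else 0)).sum = 0 := by
        apply List.sum_eq_zero
        intro v hv
        simp only [List.mem_map] at hv
        obtain ⟨y, hy, rfl⟩ := hv
        have : k ≠ y := fun e => (List.nodup_cons.mp hnd).1 (e ▸ hy)
        simp [this]
      simp [this]
    · have hne : k ≠ x := fun e => (List.nodup_cons.mp hnd).1 (e ▸ h)
      rw [ih (List.nodup_cons.mp hnd).2 h]
      simp [hne]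

theorem outA_getD (l K : List String) (d : PySem.Dict String Int)
    (hK : ∀ x ∈ K, d.contains x = true) (k : String) :
    (l.foldl (fun d key1 => midA K key1 d) d).getD k 0 =
      d.getD k 0 +
        (l.map (fun key1 =>
          (K.map (fun key2 => if k = key2 then cntF K (wordleFeedback key1 key2) else 0)).sum)).sum ∧
    (l.foldl (fun d key1 => midA K key1 d) d).keys = d.keys := by
  induction l generalizing d with
  | nil => simp
  | cons key1 l' ih =>
    simp only [List.foldl_cons, List.map_cons, List.sum_cons]
    obtain ⟨m1, m2⟩ := midA_getD K K key1 d hK k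
    have hc : ∀ x ∈ K, (midA K key1 d).contains x = true := by
      intro x hx
      rw [PySem.Dict.contains_iff_mem_keys, midA, m2, ← PySem.Dict.contains_iff_mem_keys]
      exact hK x hx
    obtain ⟨h1, h2⟩ := ih _ hc
    constructor
    · rw [h1, midA] at *
      rw [m1]; ring
    · rw [h2, midA, m2]

theorem zero_dict_getD (dictionary : List String) (d : PySem.Dict String Int)
    (h : ∀ k, d.getD k 0 = 0) (k : String) :
    (dictionary.foldl (fun d key => d.insert key 0) d).getD k 0 = 0 := by
  induction dictionary generalizing d with
  | nil => simpa using h k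
  | cons w ws ih =>
    simp only [List.foldl_cons]
    exact ih _ (fun k' => by rw [PySem.Dict.getD_insert]; split_ifs <;> simp [h])

theorem create_Qtable_items (dictionary : List String) :
    create_Qtable dictionary =
      (PySem.Set.ofList dictionary).map
        (fun g => (g, qVal (PySem.Set.ofList dictionary) g)) := by
  rw [create_Qtable_unfold]
  set dict1 : PySem.Dict String Int :=
    dictionary.foldl (fun d key => d.insert key 0) PySem.Dict.empty with hd1
  have hkeys : dict1.keys = PySem.Set.ofList dictionary := by
    have := PySem.Dict.keys_foldl_insert dictionary
      (fun _ _ => (0 : Int)) PySem.Dict.empty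
    simpa [PySem.Dict.keys_empty] using this
  have hnd : dict1.keys.Nodup := by rw [hkeys]; exact PySem.Set.nodup_ofList dictionary
  have hK : ∀ x ∈ dict1.keys, dict1.contains x = true := fun x hx =>
    (PySem.Dict.contains_iff_mem_keys _ _).mpr hx
  have hg : ∀ k, (dict1.keys.foldl (fun d key1 => midA dict1.keys key1 d) dict1).getD k 0 =
      dict1.getD k 0 +
        (dict1.keys.map (fun key1 =>
          (dict1.keys.map (fun key2 =>
            if k = key2 then cntF dict1.keys (wordleFeedback key1 key2) else 0)).sum)).sum :=
    fun k => (outA_getD dict1.keys dict1.keys dict1 hK k).1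
  have hk : (dict1.keys.foldl (fun d key1 => midA dict1.keys key1 d) dict1).keys = dict1.keys :=
    (outA_getD dict1.keys dict1.keys dict1 hK "").2
  have hz : ∀ k, dict1.getD k 0 = 0 := fun k =>
    zero_dict_getD dictionary PySem.Dict.empty (fun k' => PySem.Dict.getD_empty k' 0) k
  have hnd' : (dict1.keys.foldl (fun d key1 => midA dict1.keys key1 d) dict1).keys.Nodup := by
    rw [hk]; exact hnd
  rw [PySem.Dict.items_eq_map_keys _ hnd' 0, hk, ← hkeys]
  apply List.map_congr_left
  intro g hgmem
  rw [hg g, hz g, zero_add]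
  simp only [qVal]
  refine congrArg (Prod.mk g) (congrArg List.sum (List.map_congr_left ?_))
  intro key1 _
  exact sum_map_single dict1.keys g
    (fun key2 => cntF dict1.keys (wordleFeedback key1 key2)) hnd hgmem

-- ---- B side ----

theorem sum_count_general (l : List FB) (D : List FB) (f : FB → Int)
    (hnd : D.Nodup) (hsub : ∀ x ∈ l, x ∈ D) :
    (D.map (fun k => (l.count k : Int) * f k)).sum = (l.map f).sum := by
  induction l with
  | nil => simp
  | cons x l' ih =>
    have step : (D.map (fun k => ((x :: l').count k : Int) * f k)) =
        (D.map (fun k => ((l'.count k : Int) * f k) + (if x = k then f k else 0))) := by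
      apply List.map_congr_left
      intro k _
      rw [List.count_cons]
      push_cast
      rcases eq_or_ne x k with h | h
      · subst h; simp; ring
      · simp [h]
    rw [step, PySem.List.sum_map_add_int, ih (fun y hy => hsub y (by simp [hy])),
        sum_map_single D x f hnd (hsub x (by simp))]
    simp [add_comm]

-- the per-guess total B computes
def totB (ws : List String) (guess : String) : Int :=
  ((ws.foldl (fun (gs : PySem.Dict FB Int) target =>
      gs.insert (fbB target guess) (gs.getD (fbB target guess) 0 + 1)) PySem.Dict.empty).items).foldl
    (fun acc p =>
      acc + p.2 * (ws.foldl (fun bad w => if elimB w p.1 then bad + 1 else bad) 0)) 0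

theorem create_Qtable_alt_unfold (dictionary : List String) :
    create_Qtable_alt dictionary =
      ((PySem.List.dedup dictionary).foldl
        (fun totals guess => totals.insert guess (totB (PySem.List.dedup dictionary) guess))
        PySem.Dict.empty).items := rfl

theorem totB_eq_qVal (ws : List String) (guess : String) :
    totB ws guess = qVal ws guess := by
  have hmap : ws.map (fun t => fbB t guess) = ws.map (fun t => wordleFeedback t guess) :=
    List.map_congr_left (fun t _ => fbB_eq t guess)
  have hgroups : (ws.foldl (fun (gs : PySem.Dict FB Int) target =>
      gs.insert (fbB target guess) (gs.getD (fbB target guess) 0 + 1)) PySem.Dict.empty) =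
      PySem.Dict.counter (ws.map (fun t => wordleFeedback t guess)) := by
    rw [← hmap, ← PySem.Dict.foldl_insert_getD_add_one_eq_counter, List.foldl_map]
  have hbad : ∀ k ∈ PySem.Set.ofList (ws.map (fun t => wordleFeedback t guess)),
      (ws.foldl (fun bad w => if elimB w k then bad + 1 else bad) 0) = cntF ws k := by
    intro k hk
    rw [PySem.Set.mem_ofList] at hk
    obtain ⟨t, ht, rfl⟩ := List.mem_map.mp hk
    have hfun : (fun w => elimB w (wordleFeedback t guess)) = badP (wordleFeedback t guess) :=
      funext fun w => elimB_eq w t guess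
    calc (ws.foldl (fun bad w => if elimB w (wordleFeedback t guess) then bad + 1 else bad) 0)
        = 0 + (ws.countP (fun w => elimB w (wordleFeedback t guess)) : Int) :=
          PySem.List.foldl_count_if _ ws 0
      _ = cntF ws (wordleFeedback t guess) := by rw [hfun, zero_add]; rfl
  rw [totB, hgroups, PySem.Dict.items_counter, List.foldl_map]
  rw [PySem.List.foldl_congr_mem _ _
      (fun acc k => acc + (((ws.map (fun t => wordleFeedback t guess)).count k : Int) * cntF ws k)) 0
      (by
        intro acc k hkmem
        rw [hbad k hkmem])]
  rw [PySem.List.foldl_add, zero_add,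
      sum_count_general _ _ _ (PySem.Set.nodup_ofList _)
        (fun x hx => (PySem.Set.mem_ofList _ _).mpr hx),
      List.map_map]
  rfl

theorem create_Qtable_alt_items (dictionary : List String) :
    create_Qtable_alt dictionary =
      (PySem.Set.ofList dictionary).map
        (fun g => (g, qVal (PySem.Set.ofList dictionary) g)) := by
  rw [create_Qtable_alt_unfold]
  have hdd : PySem.List.dedup dictionary = PySem.Set.ofList dictionary :=
    PySem.List.dedup_eq_ofList dictionary
  rw [hdd]
  have hfresh := PySem.Dict.items_foldl_insert_fresh
    (PySem.Set.ofList dictionary) (fun a => a)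
    (fun a => totB (PySem.Set.ofList dictionary) a) PySem.Dict.empty
    (fun a _ => PySem.Dict.contains_empty a)
    (by simp only [List.map_id']; exact PySem.Set.nodup_ofList dictionary)
  rw [show (PySem.Dict.empty : PySem.Dict String Int).items = [] from rfl] at hfresh
  rw [hfresh]
  simp only [List.nil_append]
  exact List.map_congr_left (fun g _ => by rw [totB_eq_qVal])

theorem create_Qtable_eq_alt (dictionary : List String) :
    create_Qtable dictionary = create_Qtable_alt dictionary := by
  rw [create_Qtable_items, create_Qtable_alt_items]

-- ===== VERDICT (by name: the statement is the Claim_ definition above) =====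
theorem create_Qtable_spec : Claim_equal_create_Qtable := by
  intro d _ _
  unfold Spec_create_Qtable
  exact create_Qtable_eq_alt d
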